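-- pv_equiv track=rewrite | github.com/christianvuye/py_micro_exercises | dsa/lists, dicts, sets/03_purchase_pattern_analyzer.py | find_diverse_customers
-- ===== SOURCE A (Python) =====
-- def find_diverse_customers(purchase_records: list[tuple]) -> list[str]:
--     """
--     Identifies customers who have purchased items from more than one category.
--
--     Args:
--         purchase_records (list[tuple]): A list of tuples, where each tuple contains
--         a customer identifier and a category identifier.
--
--     Returns:
--         list[str]: A list of customer identifiers who have purchased from multiple categories.
--     """
--     user_category_count = {}
--     for purchase_record in purchase_records:
--         if purchase_record[0] not in user_category_count:
--             user_category_count[purchase_record[0]] = {purchase_record[1]}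
--         else:
--             user_category_count[purchase_record[0]].add(purchase_record[1])
--     return [k for k, v in user_category_count.items() if len(v) > 1]
-- ===== SOURCE B (Python) =====
-- def find_diverse_customers(purchase_records: list[tuple]) -> list[str]:
--     """Staged: dedupe (customer, category) pairs, then count distinct pairs per customer."""
--     seen_pairs = set()
--     distinct_pairs = []
--     for record in purchase_records:
--         pair = (record[0], record[1])
--         if pair not in seen_pairs:
--             seen_pairs.add(pair)
--             distinct_pairs.append(pair)
--     pair_counts = {}
--     for customer, _ in distinct_pairs:
--         pair_counts[customer] = pair_counts.get(customer, 0) + 1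
--     return [customer for customer, n in pair_counts.items() if n > 1]
-- ===== Notes on version B (the rewrite author's own statement) =====
-- stated objective: alternative
-- what changed: A groups records into a per-customer set of categories in one pass and measures each set's size; B never groups: it first deduplicates (customer, category) pairs preserving order, then counts the distinct pairs per customer with a plain integer counter and emits customers with count > 1.
import Mathlib
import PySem

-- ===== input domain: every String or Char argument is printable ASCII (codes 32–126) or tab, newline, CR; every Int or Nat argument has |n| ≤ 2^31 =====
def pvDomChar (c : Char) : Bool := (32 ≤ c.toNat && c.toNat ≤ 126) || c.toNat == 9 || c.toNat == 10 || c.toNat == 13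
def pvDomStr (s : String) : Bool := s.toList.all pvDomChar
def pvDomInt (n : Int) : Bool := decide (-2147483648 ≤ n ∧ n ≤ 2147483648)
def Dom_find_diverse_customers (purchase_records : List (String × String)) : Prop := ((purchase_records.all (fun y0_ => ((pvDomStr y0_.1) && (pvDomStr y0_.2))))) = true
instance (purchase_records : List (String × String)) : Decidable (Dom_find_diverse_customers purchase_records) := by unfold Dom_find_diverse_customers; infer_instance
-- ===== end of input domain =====

-- B replaces A's per-customer category sets by two staged passes: deduplicate
-- (customer, category) pairs in order, then count distinct pairs per customer.


-- ===== PORT A =====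
-- loop body of A: grow the per-customer category set
def pvStepA (d : PySem.Dict String (PySem.Set String)) (pr : String × String) :
    PySem.Dict String (PySem.Set String) :=
  if !d.contains pr.1 then d.insert pr.1 (PySem.Set.ofList [pr.2])
  else d.modify pr.1 [] (fun s => PySem.Set.add s pr.2)

def find_diverse_customers (purchase_records : List (String × String)) : List String :=
  let user_category_count := purchase_records.foldl pvStepA PySem.Dict.empty
  (user_category_count.items.filter (fun kv => PySem.Set.len kv.2 > 1)).map (·.1)

-- ===== PORT B =====
-- first loop of B: collect the distinct pairs in first-appearance order
def pvStepP (st : PySem.Set (String × String) × List (String × String))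
    (record : String × String) :
    PySem.Set (String × String) × List (String × String) :=
  if PySem.Set.contains st.1 record then st
  else (PySem.Set.add st.1 record, st.2 ++ [record])

def find_diverse_customers_alt (purchase_records : List (String × String)) : List String :=
  let st := purchase_records.foldl pvStepP (PySem.Set.empty, [])
  let pair_counts := st.2.foldl
    (fun d p => d.insert p.1 (d.getD p.1 0 + 1)) (PySem.Dict.empty : PySem.Dict String Int)
  (pair_counts.items.filter (fun kv => kv.2 > 1)).map (·.1)

-- ===== PRECONDITION & SPEC =====
def Spec_find_diverse_customers (purchase_records : List (String × String)) (out : List String) : Prop := out = find_diverse_customers_alt purchase_records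
instance (purchase_records : List (String × String)) (out : List String) : Decidable (Spec_find_diverse_customers purchase_records out) := by unfold Spec_find_diverse_customers; infer_instance

-- ===== CLAIM (what is proved, stated in full; the proofs are below) =====
def Claim_equal_find_diverse_customers : Prop := ∀ (purchase_records : List (String × String)), Dom_find_diverse_customers purchase_records → Spec_find_diverse_customers purchase_records (find_diverse_customers purchase_records)

-- ===== LEMMAS AND PROOFS =====

/-- B's dedup loop run from a duplicated state keeps both components equal to `Set.update`. -/
lemma pv_foldP (l : List (String × String)) (s : PySem.Set (String × String)) :
    l.foldl pvStepP (s, s) = (PySem.Set.update s l, PySem.Set.update s l) := by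
  induction l generalizing s with
  | nil => simp [PySem.Set.update]
  | cons p t ih =>
    rw [List.foldl_cons, PySem.Set.update_cons]
    by_cases h : p ∈ s
    · rw [show pvStepP (s, s) p = (s, s) by simp [pvStepP, h],
        PySem.Set.add_of_mem h]
      exact ih s
    · rw [show pvStepP (s, s) p = (PySem.Set.add s p, s ++ [p]) by simp [pvStepP, h],
        PySem.Set.add_of_not_mem h]
      exact ih (s ++ [p])

/-- One step of A adds the customer to the key list (as a set). -/
lemma pv_stepA_keys (d : PySem.Dict String (PySem.Set String)) (p : String × String) :
    (pvStepA d p).keys = PySem.Set.add d.keys p.1 := by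
  by_cases h : p.1 ∈ d.keys
  · have hc : d.contains p.1 = true := (PySem.Dict.contains_iff_mem_keys d p.1).mpr h
    simp [pvStepA, hc, PySem.Dict.keys_modify, PySem.Dict.keys_insert_of_contains _ _ hc,
      PySem.Set.add_of_mem h]
  · have hc : d.contains p.1 = false := by
      cases hx : d.contains p.1
      · rfl
      · exact absurd ((PySem.Dict.contains_iff_mem_keys d p.1).mp hx) h
    simp [pvStepA, hc, PySem.Dict.keys_insert_of_not_contains _ _ hc,
      PySem.Set.add_of_not_mem h]

lemma pv_foldA_keys (l : List (String × String)) (d : PySem.Dict String (PySem.Set String)) :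
    (l.foldl pvStepA d).keys = PySem.Set.update d.keys (l.map (·.1)) := by
  rw [PySem.Set.update_map_eq_foldl_add]
  induction l generalizing d with
  | nil => rfl
  | cons p t ih => rw [List.foldl_cons, List.foldl_cons, ih, pv_stepA_keys]

/-- One step of A on the value at a key. -/
lemma pv_stepA_getD (d : PySem.Dict String (PySem.Set String)) (p : String × String)
    (k : String) :
    (pvStepA d p).getD k [] =
      if k = p.1 then PySem.Set.add (d.getD k []) p.2 else d.getD k [] := by
  by_cases hcont : d.contains p.1 = true
  · have e : pvStepA d p = d.modify p.1 [] (fun s => PySem.Set.add s p.2) := by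
      simp [pvStepA, hcont]
    rw [e, PySem.Dict.getD_modify]
    split_ifs with hk
    · rw [hk]
    · rfl
  · have hc : d.contains p.1 = false := by simpa using hcont
    have e : pvStepA d p = d.insert p.1 (PySem.Set.ofList [p.2]) := by
      simp [pvStepA, hc]
    rw [e, PySem.Dict.getD_insert]
    split_ifs with hk
    · rw [hk, PySem.Dict.getD_of_not_contains d [] hc]
      rfl
    · rfl

lemma pv_foldA_getD (l : List (String × String)) (d : PySem.Dict String (PySem.Set String))
    (k : String) :
    (l.foldl pvStepA d).getD k [] =
      ((l.filter (fun p => p.1 == k)).map (·.2)).foldl PySem.Set.add (d.getD k []) := by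
  induction l generalizing d with
  | nil => rfl
  | cons p t ih =>
    rw [List.foldl_cons, ih, List.filter_cons]
    by_cases h : p.1 = k
    · simp [h, pv_stepA_getD]
    · have : (p.1 == k) = false := by simpa using h
      simp [this, pv_stepA_getD, Ne.symm h]

/-- Deduping pairs first does not change the dedup of the customers. -/
lemma pv_ofList_map_fst (l : List (String × String)) :
    PySem.Set.ofList ((PySem.Set.ofList l).map (·.1)) = PySem.Set.ofList (l.map (·.1)) := by
  induction l using List.reverseRecOn with
  | nil => rfl
  | append_singleton t p ih =>
    rw [PySem.Set.ofList_append_singleton, List.map_append, List.map_singleton,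
      PySem.Set.ofList_append_singleton, PySem.Set.add_eq_ite]
    by_cases h : p ∈ PySem.Set.ofList t
    · rw [if_pos h, ih, PySem.Set.add_of_mem]
      rw [PySem.Set.mem_ofList]
      exact List.mem_map_of_mem ((PySem.Set.mem_ofList _ _).mp h)
    · rw [if_neg h, List.map_append, List.map_singleton,
        PySem.Set.ofList_append_singleton, ih]

/-- `ofList` commutes with `filter`. -/
lemma pv_ofList_filter (l : List (String × String)) (q : String × String → Bool) :
    PySem.Set.ofList (l.filter q) = (PySem.Set.ofList l).filter q := by
  induction l using List.reverseRecOn with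
  | nil => rfl
  | append_singleton t p ih =>
    rw [List.filter_append, PySem.Set.ofList_append_singleton, PySem.Set.add_eq_ite]
    by_cases h : p ∈ PySem.Set.ofList t
    · rw [if_pos h, ← ih]
      cases hq : q p
      · simp [List.filter, hq]
      · have : PySem.Set.ofList (t.filter q ++ [p]) = PySem.Set.ofList (t.filter q) := by
          rw [PySem.Set.ofList_append_singleton, PySem.Set.add_of_mem]
          rw [PySem.Set.mem_ofList]
          exact List.mem_filter.mpr ⟨(PySem.Set.mem_ofList _ _).mp h, hq⟩
        simp [List.filter, hq, this]
    · rw [if_neg h, List.filter_append, ← ih]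
      cases hq : q p
      · simp [List.filter, hq]
      · have hp : p ∉ t.filter q := fun hx => h ((PySem.Set.mem_ofList _ _).mpr (List.mem_filter.mp hx).1)
        have hp' : p ∉ PySem.Set.ofList (t.filter q) := fun hx => hp ((PySem.Set.mem_ofList _ _).mp hx)
        simp [List.filter, hq, PySem.Set.ofList_append_singleton,
          PySem.Set.add_of_not_mem hp']

/-- When all first components equal `k`, deduping pairs is deduping the second components. -/
lemma pv_ofList_map_snd (m : List (String × String)) (k : String)
    (h : ∀ q ∈ m, q.1 = k) :
    PySem.Set.ofList (m.map (·.2)) = (PySem.Set.ofList m).map (·.2) := by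
  induction m using List.reverseRecOn with
  | nil => rfl
  | append_singleton t p ih =>
    have ht : ∀ q ∈ t, q.1 = k := fun q hq => h q (List.mem_append_left _ hq)
    have hp : p.1 = k := h p (List.mem_append_right _ (List.mem_singleton.mpr rfl))
    rw [List.map_append, List.map_singleton, PySem.Set.ofList_append_singleton,
      PySem.Set.ofList_append_singleton, ih ht, PySem.Set.add_eq_ite, PySem.Set.add_eq_ite]
    have hmem : p ∈ PySem.Set.ofList t ↔ p.2 ∈ (PySem.Set.ofList t).map (·.2) := by
      constructor
      · exact fun hx => List.mem_map_of_mem hx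
      · intro hx
        obtain ⟨q, hq, hq2⟩ := List.mem_map.mp hx
        have hq1 : q.1 = k := ht q ((PySem.Set.mem_ofList _ _).mp hq)
        have : q = p := Prod.ext (hq1.trans hp.symm) hq2
        exact this ▸ hq
    by_cases hx : p ∈ PySem.Set.ofList t
    · rw [if_pos hx, if_pos (hmem.mp hx)]
    · rw [if_neg hx, if_neg (fun hy => hx (hmem.mpr hy)), List.map_append, List.map_singleton]

/-- The number of distinct pairs with first component `k` is the number of distinct categories. -/
lemma pv_count_eq (l : List (String × String)) (k : String) :
    (((PySem.Set.ofList l).map (·.1)).count k : Int) =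
      (PySem.Set.ofList ((l.filter (fun p => p.1 == k)).map (·.2))).length := by
  have h1 : ((PySem.Set.ofList l).map (·.1)).count k
      = ((PySem.Set.ofList l).filter (fun p => p.1 == k)).length := by
    rw [List.count_eq_countP, List.countP_map, List.countP_eq_length_filter]
    rfl
  have h2 : ∀ q ∈ l.filter (fun p => p.1 == k), q.1 = k := by
    intro q hq
    simpa using (List.mem_filter.mp hq).2
  rw [h1, ← pv_ofList_filter, pv_ofList_map_snd _ k h2, List.length_map]

theorem pv_main (l : List (String × String)) :
    find_diverse_customers l = find_diverse_customers_alt l := by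
  -- B's state after the dedup pass
  have hB : l.foldl pvStepP (PySem.Set.empty, []) = (PySem.Set.ofList l, PySem.Set.ofList l) := by
    have h := pv_foldP l PySem.Set.empty
    simpa [PySem.Set.empty, PySem.Set.update_nil_left] using h
  -- B's counting pass is Counter(distinct.map fst)
  have hC : ∀ (m : List (String × String)),
      m.foldl (fun d p => d.insert p.1 (d.getD p.1 0 + 1))
        (PySem.Dict.empty : PySem.Dict String Int)
      = PySem.Dict.counter (m.map (·.1)) := by
    intro m
    rw [← PySem.Dict.foldl_insert_getD_add_one_eq_counter]
    simp only [List.foldl_map]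
  -- A's dict characterised
  set dA := l.foldl pvStepA PySem.Dict.empty with hdA
  have hkeys : dA.keys = PySem.Set.ofList (l.map (·.1)) := by
    rw [hdA, pv_foldA_keys]
    simp [PySem.Dict.keys_empty, PySem.Set.update_nil_left]
  have hnd : dA.keys.Nodup := by rw [hkeys]; exact PySem.Set.nodup_ofList _
  have hgd : ∀ k, dA.getD k [] = PySem.Set.ofList ((l.filter (fun p => p.1 == k)).map (·.2)) := by
    intro k
    rw [hdA, pv_foldA_getD]
    simp [PySem.Dict.getD_empty]
    rfl
  -- rewrite both sides as filters over the same key list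
  show (dA.items.filter (fun kv => PySem.Set.len kv.2 > 1)).map (·.1) = _
  rw [PySem.Dict.items_eq_map_keys dA hnd []]
  unfold find_diverse_customers_alt
  rw [hB]
  simp only
  rw [hC, PySem.Dict.items_counter, List.filter_map, List.filter_map,
    List.map_map, List.map_map]
  rw [hkeys, ← pv_ofList_map_fst]
  simp only [Function.comp_def]
  rw [List.map_id', List.map_id']
  apply List.filter_congr
  intro k _
  rw [hgd k]
  have := pv_count_eq l k
  simp [PySem.Set.len, ← this]

-- ===== VERDICT (by name: the statement is the Claim_ definition above) =====
theorem find_diverse_customers_spec : Claim_equal_find_diverse_customers := by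
  intro l _
  exact pv_main l
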